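-- pv_equiv track=rewrite | github.com/taigosant/exverbis-repo | exverbis/exverbis.py | get_keyword_based_on_quotation_marks
-- ===== SOURCE A (Python) =====
-- def get_keyword_based_on_quotation_marks(graph, index):
--     query = graph['query']
--     splitted_query = query.split('"')
--     index_counter = 0
--
--     for split in splitted_query:
--         # Haha
--         tokens = split.split(' ')
--         for token in tokens:
--             if index_counter == index:
--                 return tokens
--             index_counter += 1
-- ===== SOURCE B (Python) =====
-- def get_keyword_based_on_quotation_marks(graph, index):
--     groups = [s.split(' ') for s in graph['query'].split('"')]
--     count = 0
--     for group in groups: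
--         if count <= index < count + len(group):
--             return group
--         count += len(group)
--     return None
-- ===== Notes on version B (the rewrite author's own statement) =====
-- stated objective: simpler
-- what changed: Replaces A's per-token counter inner loop with a single pass over precomputed token groups using group-length arithmetic (count <= index < count + len(group)).
import Mathlib
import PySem

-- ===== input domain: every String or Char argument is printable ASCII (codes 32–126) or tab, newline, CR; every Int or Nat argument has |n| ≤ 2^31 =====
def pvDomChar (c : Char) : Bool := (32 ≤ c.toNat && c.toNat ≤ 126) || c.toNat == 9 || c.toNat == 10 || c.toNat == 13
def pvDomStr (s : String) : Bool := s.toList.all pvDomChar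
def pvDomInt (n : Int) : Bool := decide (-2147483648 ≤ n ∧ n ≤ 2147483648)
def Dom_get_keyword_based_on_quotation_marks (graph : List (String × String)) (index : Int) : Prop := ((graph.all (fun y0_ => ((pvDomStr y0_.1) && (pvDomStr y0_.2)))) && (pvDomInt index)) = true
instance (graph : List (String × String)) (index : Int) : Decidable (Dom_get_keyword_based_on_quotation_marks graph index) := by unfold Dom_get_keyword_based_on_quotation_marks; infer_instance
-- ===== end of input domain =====

-- ===== PORT A =====
-- Header: B walks precomputed token groups with group-length arithmetic instead of A's per-token counter (objective: simpler).
-- inner token loop of A: walk tokens with the counter; return the whole token list when counter == index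
def pvA_inner (toks : List String) : List String → Int → Int → Option (List String) × Int
  | [], c, _ => (none, c)
  | _ :: rest, c, idx => if c = idx then (some toks, c) else pvA_inner toks rest (c + 1) idx

-- outer loop of A over the quote splits
def pvA_outer : List String → Int → Int → Option (List String)
  | [], _, _ => none
  | s :: rest, c, idx =>
    let toks := (PySem.Str.split? s " ").getD []
    match pvA_inner toks toks c idx with
    | (some r, _) => some r
    | (none, c') => pvA_outer rest c' idx

def get_keyword_based_on_quotation_marks (graph : List (String × String)) (index : Int) : Option (List String) :=
  let query := PySem.Dict.getD (PySem.Dict.mk graph) "query" ""   -- Pre_ guarantees the key is present (KeyError otherwise)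
  pvA_outer ((PySem.Str.split? query "\"").getD []) 0 index

-- ===== PORT B =====
def pvB_go : List (List String) → Int → Int → Option (List String)
  | [], _, _ => none
  | g :: rest, count, idx =>
    if count ≤ idx ∧ idx < count + (g.length : Int) then some g
    else pvB_go rest (count + (g.length : Int)) idx

def get_keyword_based_on_quotation_marks_alt (graph : List (String × String)) (index : Int) : Option (List String) :=
  let query := PySem.Dict.getD (PySem.Dict.mk graph) "query" ""
  let groups := ((PySem.Str.split? query "\"").getD []).map (fun s => (PySem.Str.split? s " ").getD [])
  pvB_go groups 0 index

-- ===== PRECONDITION & SPEC =====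
-- Pre_ excludes exactly the inputs where graph['query'] raises KeyError.
def Pre_get_keyword_based_on_quotation_marks (graph : List (String × String)) (index : Int) : Prop :=
  (graph.map Prod.fst).contains "query" = true
instance (graph : List (String × String)) (index : Int) : Decidable (Pre_get_keyword_based_on_quotation_marks graph index) := by unfold Pre_get_keyword_based_on_quotation_marks; infer_instance
def pvWitness_get_keyword_based_on_quotation_marks : (List (String × String)) × Int := ([("query", "a b \"c d\" e")], 2)

def Spec_get_keyword_based_on_quotation_marks (graph : List (String × String)) (index : Int) (out : Option (List String)) : Prop := out = get_keyword_based_on_quotation_marks_alt graph index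
instance (graph : List (String × String)) (index : Int) (out : Option (List String)) : Decidable (Spec_get_keyword_based_on_quotation_marks graph index out) := by unfold Spec_get_keyword_based_on_quotation_marks; infer_instance

-- ===== CLAIM =====
def Claim_equal_get_keyword_based_on_quotation_marks : Prop := ∀ (graph : List (String × String)) (index : Int), Dom_get_keyword_based_on_quotation_marks graph index → Pre_get_keyword_based_on_quotation_marks graph index → Spec_get_keyword_based_on_quotation_marks graph index (get_keyword_based_on_quotation_marks graph index)

-- ===== LEMMAS AND PROOFS =====
lemma pvA_inner_eq (toks : List String) (rem : List String) (c idx : Int) :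
    pvA_inner toks rem c idx =
      if c ≤ idx ∧ idx < c + (rem.length : Int) then (some toks, idx)
      else (none, c + (rem.length : Int)) := by
  induction rem generalizing c with
  | nil =>
    simp only [pvA_inner, List.length_nil, Nat.cast_zero, add_zero]
    rw [if_neg (by omega)]
  | cons hd t ih =>
    simp only [pvA_inner, List.length_cons]
    by_cases hc : c = idx
    · subst hc
      rw [if_pos rfl, if_pos (by push_cast; omega)]
    · rw [if_neg hc, ih]
      split_ifs with h1 h2 h2
      · rfl
      · exfalso; push_cast at h1 h2; omega
      · exfalso; push_cast at h1 h2; omega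
      · refine Prod.ext rfl ?_; push_cast; omega

lemma outer_eq_go (splits : List String) (c idx : Int) :
    pvA_outer splits c idx = pvB_go (splits.map (fun s => (PySem.Str.split? s " ").getD [])) c idx := by
  induction splits generalizing c with
  | nil => rfl
  | cons s rest ih =>
    simp only [pvA_outer, List.map, pvB_go]
    rw [pvA_inner_eq]
    split_ifs with h
    · simp
    · simp [ih]

-- ===== VERDICT =====
theorem get_keyword_based_on_quotation_marks_spec : Claim_equal_get_keyword_based_on_quotation_marks := by
  intro graph index _ _
  unfold Spec_get_keyword_based_on_quotation_marks get_keyword_based_on_quotation_marks get_keyword_based_on_quotation_marks_alt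
  exact outer_eq_go _ 0 index
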